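-- pv_equiv track=rewrite | github.com/preciousoreva/code-scripts | apps/epos_qbo/views.py | _reconciliation_label_for_job
-- ===== SOURCE A (Python) =====
-- def _reconciliation_label_for_job(job_id: str, artifacts_by_job: dict) -> str:
--     """Return 'Match', 'Mismatch', or 'Not reconciled' for a run from its artifacts' reconcile_status."""
--     statuses = artifacts_by_job.get(job_id) or []
--     if not statuses:
--         return "Not reconciled"
--     if any(s == "MISMATCH" for s in statuses):
--         return "Mismatch"
--     if all(s == "MATCH" for s in statuses):
--         return "Match"
--     return "Not reconciled"
-- ===== SOURCE B (Python) =====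
-- def _reconciliation_label_for_job(job_id: str, artifacts_by_job: dict) -> str:
--     """Return 'Match', 'Mismatch', or 'Not reconciled' for a run from its artifacts' reconcile_status."""
--     statuses = artifacts_by_job.get(job_id) or []
--     if not statuses:
--         return "Not reconciled"
--     all_match = True
--     for s in statuses:
--         if s == "MISMATCH":
--             return "Mismatch"
--         if s != "MATCH":
--             all_match = False
--     return "Match" if all_match else "Not reconciled"
-- ===== Notes on version B (the rewrite author's own statement) =====
-- stated objective: simpler
-- what changed: Replaced the two separate full scans (any-MISMATCH then all-MATCH) by one single pass that returns 'Mismatch' on the first 'MISMATCH' and tracks an all_match flag.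
import Mathlib
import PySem

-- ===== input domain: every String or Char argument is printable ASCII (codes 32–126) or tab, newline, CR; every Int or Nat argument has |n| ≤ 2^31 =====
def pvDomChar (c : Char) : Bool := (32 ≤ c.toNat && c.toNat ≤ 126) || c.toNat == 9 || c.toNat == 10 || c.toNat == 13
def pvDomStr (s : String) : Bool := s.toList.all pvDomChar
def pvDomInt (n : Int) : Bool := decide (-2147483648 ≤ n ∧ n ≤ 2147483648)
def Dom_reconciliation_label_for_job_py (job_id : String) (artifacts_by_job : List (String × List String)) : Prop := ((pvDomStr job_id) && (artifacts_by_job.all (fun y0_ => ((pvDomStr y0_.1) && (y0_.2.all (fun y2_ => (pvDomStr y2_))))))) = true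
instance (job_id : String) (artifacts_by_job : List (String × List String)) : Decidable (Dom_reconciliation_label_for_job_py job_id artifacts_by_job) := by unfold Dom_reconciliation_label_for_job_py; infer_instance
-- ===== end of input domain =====

-- B collapses A's two full scans into one pass with an all_match flag (simpler; same O(n) cost).


-- ===== PORT A =====
def reconciliation_label_for_job_py (job_id : String) (artifacts_by_job : List (String × List String)) : String :=
  let statuses : List String :=
    match PySem.Dict.get? (PySem.Dict.ofList artifacts_by_job) job_id with
    | some s => if s = [] then [] else s   -- `or []` : an empty list is falsy
    | none => []
  if statuses = [] then "Not reconciled"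
  else if statuses.any (fun s => s == "MISMATCH") then "Mismatch"
  else if statuses.all (fun s => s == "MATCH") then "Match"
  else "Not reconciled"

-- ===== PORT B =====
def pvAltLoop : List String → Bool → String
  | [], all_match => if all_match then "Match" else "Not reconciled"
  | s :: rest, all_match =>
    if s = "MISMATCH" then "Mismatch"
    else pvAltLoop rest (all_match && decide (s = "MATCH"))

def reconciliation_label_for_job_py_alt (job_id : String) (artifacts_by_job : List (String × List String)) : String :=
  let statuses : List String :=
    match PySem.Dict.get? (PySem.Dict.ofList artifacts_by_job) job_id with
    | some s => if s = [] then [] else s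
    | none => []
  if statuses = [] then "Not reconciled"
  else pvAltLoop statuses true

-- ===== PRECONDITION & SPEC =====
def Spec_reconciliation_label_for_job_py (job_id : String) (artifacts_by_job : List (String × List String)) (out : String) : Prop := out = reconciliation_label_for_job_py_alt job_id artifacts_by_job
instance (job_id : String) (artifacts_by_job : List (String × List String)) (out : String) : Decidable (Spec_reconciliation_label_for_job_py job_id artifacts_by_job out) := by unfold Spec_reconciliation_label_for_job_py; infer_instance

-- ===== CLAIM (what is proved, stated in full; the proofs are below) =====
def Claim_equal_reconciliation_label_for_job_py : Prop := ∀ (job_id : String) (artifacts_by_job : List (String × List String)), Dom_reconciliation_label_for_job_py job_id artifacts_by_job → Spec_reconciliation_label_for_job_py job_id artifacts_by_job (reconciliation_label_for_job_py job_id artifacts_by_job)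

-- ===== LEMMAS AND PROOFS =====
lemma pvAltLoop_eq (l : List String) (b : Bool) :
    pvAltLoop l b =
      if l.any (fun s => s == "MISMATCH") then "Mismatch"
      else if b && l.all (fun s => s == "MATCH") then "Match"
      else "Not reconciled" := by
  induction l generalizing b with
  | nil => cases b <;> simp [pvAltLoop]
  | cons s rest ih =>
    by_cases hs : s = "MISMATCH"
    · simp [pvAltLoop, hs]
    · simp only [pvAltLoop, if_neg hs, ih, List.any_cons, List.all_cons]
      by_cases hrest : rest.any (fun s => s == "MISMATCH") = true
      · simp [hrest]
      · simp [hrest, hs, Bool.and_assoc]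

-- ===== VERDICT (by name: the statement is the Claim_ definition above) =====
theorem reconciliation_label_for_job_py_spec : Claim_equal_reconciliation_label_for_job_py := by
  intro job_id abj _
  unfold Spec_reconciliation_label_for_job_py reconciliation_label_for_job_py reconciliation_label_for_job_py_alt
  cases h : PySem.Dict.get? (PySem.Dict.ofList abj) job_id with
  | none => simp
  | some s =>
    by_cases hs : s = []
    · simp [hs]
    · simp [if_neg hs, pvAltLoop_eq]
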